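-- pv_equiv track=rewrite | github.com/J1mmyChanga/EGE_Martynenkov | 23/dz/18.py | f
-- ===== SOURCE A (Python) =====
-- def f(c, e, n):
--     if c > e:
--         return 0
--     if c == e and n == 7:
--         return 1
--     if c == e and n != 7:
--         return 0
--     if c < e:
--         return f(c+1, e, n+1) + f(c + 4, e, n+1) + f(c*2, e, n+1)
-- ===== SOURCE B (Python) =====
-- def f(c, e, n):
--     # Forward DP on reachable values: counts paths of length exactly 7-n from c to e
--     # (moves +1, +4, *2, stopping at e), instead of A's tree recursion.
--     if c > e:
--         return 0
--     if c == e: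
--         return 1 if n == 7 else 0
--     k = 7 - n
--     if k <= 0:
--         return 0
--     counts = {c: 1}
--     for _ in range(k):
--         if not counts:
--             return 0
--         new = {}
--         for s, m in counts.items():
--             if s == e:
--                 continue
--             for t in (s + 1, s + 4, s * 2):
--                 if t <= e:
--                     new[t] = new.get(t, 0) + m
--         counts = new
--     return counts.get(e, 0)
-- ===== Notes on version B (the rewrite author's own statement) =====
-- stated objective: alternative
-- what changed: A's three-way tree recursion is replaced by an iterative forward dynamic-programming pass that keeps a dictionary of reachable values with path multiplicities and advances it 7-n steps, so shared subproblems are counted once.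
import Mathlib
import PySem

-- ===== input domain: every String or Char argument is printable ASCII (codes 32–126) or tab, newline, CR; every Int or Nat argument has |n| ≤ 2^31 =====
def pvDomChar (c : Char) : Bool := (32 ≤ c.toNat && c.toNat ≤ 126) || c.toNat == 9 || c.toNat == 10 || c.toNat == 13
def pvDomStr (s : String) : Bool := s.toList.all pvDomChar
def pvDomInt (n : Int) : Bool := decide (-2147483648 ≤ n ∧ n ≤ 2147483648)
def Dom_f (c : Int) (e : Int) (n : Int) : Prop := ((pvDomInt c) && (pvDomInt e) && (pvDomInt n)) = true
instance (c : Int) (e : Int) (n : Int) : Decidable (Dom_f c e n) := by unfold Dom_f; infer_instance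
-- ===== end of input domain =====

-- B replaces A's tree recursion by a forward dictionary DP over reachable values
-- (counting paths of length exactly 7-n): a genuinely different algorithm, same results.


-- ===== PORT A =====
-- Literal port of A; the `0 < c` guard only makes the recursion total: for
-- c ≤ 0 < e the Python recurses forever (outside Pre_f), and the port returns 0 there.
def f (c : Int) (e : Int) (n : Int) : Int :=
  if c > e then 0
  else if c = e ∧ n = 7 then 1
  else if c = e ∧ n ≠ 7 then 0
  else if 0 < c then
    f (c + 1) e (n + 1) + f (c + 4) e (n + 1) + f (c * 2) e (n + 1)
  else 0
termination_by (e - c).toNat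
decreasing_by all_goals (simp_all; omega)

-- ===== PORT B =====
-- one DP step: expand a state s ≠ e into s+1, s+4, s*2, pruning successors > e
def stepPair (e : Int) (new : PySem.Dict Int Int) (p : Int × Int) : PySem.Dict Int Int :=
  if p.1 = e then new
  else
    [p.1 + 1, p.1 + 4, p.1 * 2].foldl
      (fun new t => if t ≤ e then new.insert t (new.getD t 0 + p.2) else new) new

def fAltStep (e : Int) (counts : PySem.Dict Int Int) : PySem.Dict Int Int :=
  counts.items.foldl (stepPair e) PySem.Dict.empty

def fAltLoop (e : Int) : Nat → PySem.Dict Int Int → Int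
  | 0, counts => counts.getD e 0
  | k + 1, counts =>
      if counts.items = [] then 0 else fAltLoop e k (fAltStep e counts)

def f_alt (c : Int) (e : Int) (n : Int) : Int :=
  if c > e then 0
  else if c = e then (if n = 7 then 1 else 0)
  else if 7 - n ≤ 0 then 0
  else fAltLoop e (7 - n).toNat ((PySem.Dict.empty : PySem.Dict Int Int).insert c 1)

-- ===== PRECONDITION & SPEC =====
-- Pre_f excludes exactly the inputs (c ≤ 0 and c < e) on which the Python A never
-- returns: the c*2 move then no longer increases c and the recursion is infinite
-- (it dies with RecursionError).
def Pre_f (c : Int) (e : Int) (n : Int) : Prop := 1 ≤ c ∨ e ≤ c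
instance (c : Int) (e : Int) (n : Int) : Decidable (Pre_f c e n) := by unfold Pre_f; infer_instance
def pvWitness_f : Int × Int × Int := (2, 10, 3)

def Spec_f (c : Int) (e : Int) (n : Int) (out : Int) : Prop := out = f_alt c e n
instance (c : Int) (e : Int) (n : Int) (out : Int) : Decidable (Spec_f c e n out) := by unfold Spec_f; infer_instance

-- ===== CLAIM (what is proved, stated in full; the proofs are below) =====
def Claim_equal_f : Prop := ∀ (c : Int) (e : Int) (n : Int), Dom_f c e n → Pre_f c e n → Spec_f c e n (f c e n)

-- ===== LEMMAS AND PROOFS =====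

-- number of paths from s reaching e in exactly k steps (stopping at e)
def P (e : Int) : Nat → Int → Int
  | 0, s => if s = e then 1 else 0
  | k + 1, s => if e ≤ s then 0 else P e k (s + 1) + P e k (s + 4) + P e k (s * 2)

-- weighted sum of P over a list of (state, multiplicity) pairs
def S (e : Int) (k : Nat) (l : List (Int × Int)) : Int :=
  (l.map (fun p => p.2 * P e k p.1)).sum

theorem P_of_gt (e : Int) (k : Nat) (s : Int) (h : e < s) : P e k s = 0 := by
  cases k <;> simp [P] <;> omega

theorem f_of_gt7 (c e n : Int) (hc : 1 ≤ c) (hn : 7 < n) : f c e n = 0 := by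
  rw [f]
  split_ifs with h1 h2 h3 h4
  · rfl
  · omega
  · rfl
  · have ih1 := f_of_gt7 (c + 1) e (n + 1) (by omega) (by omega)
    have ih2 := f_of_gt7 (c + 4) e (n + 1) (by omega) (by omega)
    have ih3 := f_of_gt7 (c * 2) e (n + 1) (by omega) (by omega)
    omega
  · rfl
termination_by (e - c).toNat
decreasing_by all_goals omega

theorem f_eq_P (c e n : Int) (hc : 1 ≤ c) (hn : n ≤ 7) :
    f c e n = P e (7 - n).toNat c := by
  rw [f]
  split_ifs with h1 h2 h3 h4
  · rw [P_of_gt e _ c h1]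
  · have h0 : (7 - n).toNat = 0 := by omega
    simp [h0, P, h2.1]
  · have hk : (7 - n).toNat = (6 - n).toNat + 1 := by
      have := h3.2; omega
    simp [hk, P, h3.1]
  · by_cases h7 : n = 7
    · subst h7
      rw [show ((7:Int) - 7).toNat = 0 from by norm_num]
      rw [f_of_gt7 (c + 1) e (7 + 1) (by omega) (by omega),
          f_of_gt7 (c + 4) e (7 + 1) (by omega) (by omega),
          f_of_gt7 (c * 2) e (7 + 1) (by omega) (by omega)]
      simp [P, show c ≠ e from by tauto]
    · have hm : (7 - n).toNat = (7 - (n + 1)).toNat + 1 := by omega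
      have hce : c < e := by
        rcases lt_trichotomy c e with h | h | h
        · exact h
        · exact absurd h (by tauto)
        · omega
      rw [hm, P,
          f_eq_P (c + 1) e (n + 1) (by omega) (by omega),
          f_eq_P (c + 4) e (n + 1) (by omega) (by omega),
          f_eq_P (c * 2) e (n + 1) (by omega) (by omega),
          if_neg (by omega)]
  · omega
termination_by (e - c).toNat
decreasing_by all_goals omega

theorem S_nil (e : Int) (k : Nat) : S e k [] = 0 := rfl

theorem S_cons (e : Int) (k : Nat) (p : Int × Int) (l : List (Int × Int)) :
    S e k (p :: l) = p.2 * P e k p.1 + S e k l := by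
  simp [S]

theorem S_append (e : Int) (k : Nat) (l l' : List (Int × Int)) :
    S e k (l ++ l') = S e k l + S e k l' := by
  simp [S]

theorem S_zero_of_not_mem (e : Int) (l : List (Int × Int))
    (h : ∀ p ∈ l, p.1 ≠ e) : S e 0 l = 0 := by
  induction l with
  | nil => rfl
  | cons q l ih =>
    rw [S_cons, ih (fun p hp => h p (List.mem_cons_of_mem q hp))]
    simp [P, h q List.mem_cons_self]

theorem S_zero_eq_getD (e : Int) (d : PySem.Dict Int Int) (hnd : d.keys.Nodup) :
    S e 0 d.items = d.getD e 0 := by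
  obtain ⟨l⟩ := d
  induction l with
  | nil => rfl
  | cons q l ih =>
    simp only [PySem.Dict.keys_mk, List.map_cons, List.nodup_cons] at hnd
    rw [show (PySem.Dict.mk (q :: l)).items = q :: l from rfl, S_cons,
        PySem.Dict.getD_eq_get?_getD, PySem.Dict.get?_mk_cons]
    by_cases hq : q.1 = e
    · have htail : ∀ p ∈ l, p.1 ≠ e := by
        intro p hp hpe
        exact hnd.1 (hq ▸ hpe ▸ List.mem_map_of_mem hp)
      rw [S_zero_of_not_mem e l htail]
      simp [P, hq]
    · have hrec := ih (by simpa [PySem.Dict.keys_mk] using hnd.2)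
      rw [PySem.Dict.getD_eq_get?_getD] at hrec
      simp only [show (q.1 == e) = false from by simp [hq]]
      rw [show (PySem.Dict.mk l).items = l from rfl] at hrec
      rw [hrec]
      simp [P, hq]

-- replacing the unique entry with key t by (t, v) changes the sum by (v - w) * P
theorem S_replace (e : Int) (k : Nat) (l : List (Int × Int)) (t v w : Int)
    (hnd : (l.map Prod.fst).Nodup) (hmem : (t, w) ∈ l) :
    S e k (l.map (fun p => if p.1 == t then (t, v) else p))
      = S e k l + (v - w) * P e k t := by
  induction l with
  | nil => simp at hmem
  | cons q l ih =>
    simp only [List.map_cons, List.nodup_cons] at hnd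
    rcases List.mem_cons.mp hmem with hq | hl
    · have hq1 : q.1 = t := by rw [← hq]
      have hq2 : q.2 = w := by rw [← hq]
      have htail : ∀ p ∈ l, p.1 ≠ t := by
        intro p hp hpe
        exact hnd.1 (hq1 ▸ hpe ▸ List.mem_map_of_mem hp)
      have hid : l.map (fun p => if p.1 == t then (t, v) else p) = l := by
        rw [List.map_congr_left (g := id) (fun p hp => by simp [htail p hp]), List.map_id]
      simp only [List.map_cons, hid, show (q.1 == t) = true from by simp [hq1], if_true]
      rw [S_cons, S_cons, hq1, hq2]
      ring
    · have hq : q.1 ≠ t := by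
        intro hqe
        exact hnd.1 (hqe ▸ (List.mem_map_of_mem hl : (t, w).1 ∈ l.map Prod.fst))
      simp only [List.map_cons, show (q.1 == t) = false from by simp [hq],
        Bool.false_eq_true, if_false]
      rw [S_cons, S_cons, ih hnd.2 hl]
      ring

theorem S_insert_add (e : Int) (k : Nat) (d : PySem.Dict Int Int) (t m : Int)
    (hnd : d.keys.Nodup) :
    S e k ((d.insert t (d.getD t 0 + m)).items) = S e k d.items + m * P e k t := by
  by_cases hcon : d.contains t = true
  · have hsome : ∃ w, d.get? t = some w := by
      rcases h : d.get? t with _ | w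
      · rw [PySem.Dict.contains_eq_isSome_get?, h] at hcon; simp at hcon
      · exact ⟨w, rfl⟩
    obtain ⟨w, hw⟩ := hsome
    have hgetD : d.getD t 0 = w := PySem.Dict.getD_of_get?_eq_some d 0 hw
    have hmem : (t, w) ∈ d.items := PySem.Dict.mem_items_of_get?_eq_some d hw
    rw [PySem.Dict.items_insert_of_contains d _ hcon,
        S_replace e k d.items t (d.getD t 0 + m) w hnd hmem, hgetD]
    ring
  · have hcon' : d.contains t = false := by simpa using hcon
    rw [PySem.Dict.items_insert_of_not_contains d _ hcon',
        S_append, S_cons, S_nil,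
        PySem.Dict.getD_of_not_contains d 0 hcon']
    ring

theorem dpInner_nodup (e m : Int) (ts : List Int) (d : PySem.Dict Int Int)
    (hnd : d.keys.Nodup) :
    (ts.foldl (fun new t => if t ≤ e then new.insert t (new.getD t 0 + m) else new) d).keys.Nodup := by
  induction ts generalizing d with
  | nil => exact hnd
  | cons t ts ih =>
    rw [List.foldl_cons]
    split_ifs with h
    · exact ih _ (PySem.Dict.nodup_keys_insert d t _ hnd)
    · exact ih _ hnd

theorem dpInner_keys_le (e m : Int) (ts : List Int) (d : PySem.Dict Int Int)
    (hle : ∀ x ∈ d.keys, x ≤ e) :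
    ∀ x ∈ (ts.foldl (fun new t => if t ≤ e then new.insert t (new.getD t 0 + m) else new) d).keys, x ≤ e := by
  induction ts generalizing d with
  | nil => exact hle
  | cons t ts ih =>
    rw [List.foldl_cons]
    split_ifs with h
    · refine ih _ ?_
      intro x hx
      rcases (PySem.Dict.mem_keys_insert d t x _).mp hx with h' | h'
      · omega
      · exact hle x h'
    · exact ih _ hle

theorem dpInner_sum (e m : Int) (k : Nat) (ts : List Int) (d : PySem.Dict Int Int)
    (hnd : d.keys.Nodup) :
    S e k ((ts.foldl (fun new t => if t ≤ e then new.insert t (new.getD t 0 + m) else new) d)).items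
      = S e k d.items + (ts.map (fun t => if t ≤ e then m * P e k t else 0)).sum := by
  induction ts generalizing d with
  | nil => simp
  | cons t ts ih =>
    rw [List.foldl_cons, List.map_cons, List.sum_cons]
    split_ifs with h
    · rw [ih _ (PySem.Dict.nodup_keys_insert d t _ hnd), S_insert_add e k d t m hnd]
      ring
    · rw [ih _ hnd]
      ring

theorem stepPair_nodup (e : Int) (d : PySem.Dict Int Int) (p : Int × Int)
    (hnd : d.keys.Nodup) : (stepPair e d p).keys.Nodup := by
  unfold stepPair
  split_ifs with h
  · exact hnd
  · exact dpInner_nodup e p.2 _ d hnd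

theorem stepPair_keys_le (e : Int) (d : PySem.Dict Int Int) (p : Int × Int)
    (hle : ∀ x ∈ d.keys, x ≤ e) : ∀ x ∈ (stepPair e d p).keys, x ≤ e := by
  unfold stepPair
  split_ifs with h
  · exact hle
  · exact dpInner_keys_le e p.2 _ d hle

theorem stepPair_sum (e : Int) (k : Nat) (d : PySem.Dict Int Int) (p : Int × Int)
    (hnd : d.keys.Nodup) (hp : p.1 ≤ e) :
    S e k (stepPair e d p).items = S e k d.items + p.2 * P e (k + 1) p.1 := by
  unfold stepPair
  split_ifs with h
  · rw [h, show P e (k + 1) e = 0 from by rw [P, if_pos le_rfl]]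
    ring
  · have hplt : p.1 < e := lt_of_le_of_ne hp h
    rw [dpInner_sum e p.2 k _ d hnd]
    have hexp : ([p.1 + 1, p.1 + 4, p.1 * 2].map
        (fun t => if t ≤ e then p.2 * P e k t else 0)).sum
        = p.2 * P e (k + 1) p.1 := by
      rw [P, if_neg (by omega)]
      simp only [List.map_cons, List.map_nil, List.sum_cons, List.sum_nil]
      have c1 : (if p.1 + 1 ≤ e then p.2 * P e k (p.1 + 1) else 0) = p.2 * P e k (p.1 + 1) := by
        split_ifs with hc
        · rfl
        · rw [P_of_gt e k _ (by omega)]; ring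
      have c2 : (if p.1 + 4 ≤ e then p.2 * P e k (p.1 + 4) else 0) = p.2 * P e k (p.1 + 4) := by
        split_ifs with hc
        · rfl
        · rw [P_of_gt e k _ (by omega)]; ring
      have c3 : (if p.1 * 2 ≤ e then p.2 * P e k (p.1 * 2) else 0) = p.2 * P e k (p.1 * 2) := by
        split_ifs with hc
        · rfl
        · rw [P_of_gt e k _ (by omega)]; ring
      rw [c1, c2, c3]
      ring
    rw [hexp]

theorem outer_nodup (e : Int) (l : List (Int × Int)) (d : PySem.Dict Int Int)
    (hnd : d.keys.Nodup) : (l.foldl (stepPair e) d).keys.Nodup := by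
  induction l generalizing d with
  | nil => exact hnd
  | cons p l ih =>
    rw [List.foldl_cons]
    exact ih _ (stepPair_nodup e d p hnd)

theorem outer_keys_le (e : Int) (l : List (Int × Int)) (d : PySem.Dict Int Int)
    (hle : ∀ x ∈ d.keys, x ≤ e) :
    ∀ x ∈ (l.foldl (stepPair e) d).keys, x ≤ e := by
  induction l generalizing d with
  | nil => exact hle
  | cons p l ih =>
    rw [List.foldl_cons]
    exact ih _ (stepPair_keys_le e d p hle)

theorem outer_sum (e : Int) (k : Nat) (l : List (Int × Int)) (d : PySem.Dict Int Int)
    (hnd : d.keys.Nodup) (hl : ∀ p ∈ l, p.1 ≤ e) :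
    S e k ((l.foldl (stepPair e) d)).items = S e k d.items + S e (k + 1) l := by
  induction l generalizing d with
  | nil => simp [S_nil]
  | cons p l ih =>
    rw [List.foldl_cons, S_cons,
        ih _ (stepPair_nodup e d p hnd) (fun q hq => hl q (List.mem_cons_of_mem p hq)),
        stepPair_sum e k d p hnd (hl p List.mem_cons_self)]
    ring

theorem step_sum (e : Int) (k : Nat) (counts : PySem.Dict Int Int)
    (hnd : counts.keys.Nodup) (hle : ∀ x ∈ counts.keys, x ≤ e) :
    S e k (fAltStep e counts).items = S e (k + 1) counts.items := by
  unfold fAltStep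
  rw [outer_sum e k counts.items PySem.Dict.empty (by simpa using PySem.Dict.nodup_keys_empty)
      (fun p hp => hle p.1 (List.mem_map_of_mem hp)),
      show (PySem.Dict.empty : PySem.Dict Int Int).items = [] from rfl, S_nil]
  ring

theorem loop_eq_S (e : Int) (k : Nat) (counts : PySem.Dict Int Int)
    (hnd : counts.keys.Nodup) (hle : ∀ x ∈ counts.keys, x ≤ e) :
    fAltLoop e k counts = S e k counts.items := by
  induction k generalizing counts with
  | zero => exact (S_zero_eq_getD e counts hnd).symm
  | succ k ih =>
    rw [fAltLoop]
    split_ifs with h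
    · rw [h, S_nil]
    · rw [ih (fAltStep e counts)
          (by unfold fAltStep; exact outer_nodup e _ _ (by simpa using PySem.Dict.nodup_keys_empty))
          (by unfold fAltStep; exact outer_keys_le e _ _ (by simp [PySem.Dict.keys_empty]))]
      exact step_sum e k counts hnd hle

-- ===== VERDICT (by name: the statement is the Claim_ definition above) =====
theorem f_spec : Claim_equal_f := by
  intro c e n _ hpre
  unfold Spec_f f_alt
  split_ifs with h1 h2 h3 h4
  · rw [f]; simp [h1]
  · rw [f]; subst h2; simp [h3]
  · rw [f]; subst h2; simp [h3]
  · -- c < e and n ≥ 7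
    have hpre' : 1 ≤ c ∨ e ≤ c := hpre
    have hc : 1 ≤ c := by omega
    by_cases h7 : n = 7
    · rw [f_eq_P c e n hc (by omega), show (7 - n).toNat = 0 from by omega]
      simp [P, h2]
    · exact f_of_gt7 c e n hc (by omega)
  · -- c < e and n < 7
    have hpre' : 1 ≤ c ∨ e ≤ c := hpre
    have hc : 1 ≤ c := by omega
    have hce : c < e := by omega
    have hd0 : ((PySem.Dict.empty : PySem.Dict Int Int).insert c 1).items = [(c, 1)] := by
      rw [PySem.Dict.items_insert_of_not_contains _ _ (by simp [PySem.Dict.contains_empty])]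
      rfl
    rw [f_eq_P c e n hc (by omega),
        loop_eq_S e _ _ (PySem.Dict.nodup_keys_insert _ _ _ (by simpa using PySem.Dict.nodup_keys_empty))
          (by intro x hx
              rcases (PySem.Dict.mem_keys_insert _ _ _ _).mp hx with h' | h'
              · omega
              · simp [PySem.Dict.keys_empty] at h'),
        hd0, S_cons, S_nil]
    ring
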